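-- pv_equiv track=rewrite | github.com/nxp-imx/gtec-demo-framework | .Config/FslBuildGen/Util.py | __IsValidUnresolvedPackageName
-- ===== SOURCE A (Python) =====
-- def IsValidNameStartCharacter(ch: str) -> bool:
--     return ((ch >= 'a' and ch <= 'z') or (ch >= 'A' and ch <= 'Z'))
--
-- def IsValidNameCharacter(ch: str) -> bool:
--     return ((ch >= 'a' and ch <= 'z') or (ch >= 'A' and ch <= 'Z') or (ch >= '0' and ch <= '9') or (ch == '_'))
--
-- def __IsValidUnresolvedPackageName(name: str) -> bool:
--     isFirstCharInName = True
--     previousChar = ' '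
--     for ch in name:
--         if ch != '.':
--             if not isFirstCharInName:
--                 # Double underscores are reserved for internal use
--                 if ch == '_' and previousChar == '_':
--                     return False
--                 if not IsValidNameCharacter(ch):
--                     return False
--             else:
--                 if not IsValidNameStartCharacter(ch):
--                     return False
--                 isFirstCharInName = False
--         elif previousChar == '.':
--             return False
--         else:
--             isFirstCharInName = True
--         previousChar = ch
--     return True
-- ===== SOURCE B (Python) =====
-- def __IsValidUnresolvedPackageName(name: str) -> bool:
--     segments = name.split('.')
--     last = len(segments) - 1
--     for i, seg in enumerate(segments):
--         if seg == '':
--             if 0 < i < last: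
--                 return False
--         elif not (seg[0].isalpha()
--                   and all(c.isalpha() or c.isdigit() or c == '_' for c in seg[1:])
--                   and '__' not in seg):
--             return False
--     return True
-- ===== Notes on version B (the rewrite author's own statement) =====
-- stated objective: alternative
-- what changed: Replaces A's single flag-threaded character scan (isFirstCharInName/previousChar state machine with early returns) by a split-on-dot-then-validate-each-segment decomposition: empty segments allowed only at the first or last index, non-empty segments must start with a letter, continue with letters/digits/underscore and contain no double-underscore substring.
import Mathlib
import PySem

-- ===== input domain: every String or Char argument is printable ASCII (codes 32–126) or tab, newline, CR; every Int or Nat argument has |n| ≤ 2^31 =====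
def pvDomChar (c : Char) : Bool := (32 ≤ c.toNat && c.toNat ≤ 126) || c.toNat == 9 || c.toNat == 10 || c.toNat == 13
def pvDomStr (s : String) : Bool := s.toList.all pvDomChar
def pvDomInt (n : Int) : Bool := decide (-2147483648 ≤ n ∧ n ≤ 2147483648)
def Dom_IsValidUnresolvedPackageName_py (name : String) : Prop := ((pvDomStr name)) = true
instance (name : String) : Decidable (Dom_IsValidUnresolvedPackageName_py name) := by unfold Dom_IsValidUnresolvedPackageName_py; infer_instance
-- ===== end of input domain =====

-- B replaces A's flag-threaded single character scan by a split-on-dot-then-validate-each-segment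
-- decomposition (alternative decomposition; a timing run measured B faster by a constant factor).

-- ===== PORT A =====
def IsValidNameStartCharacter (ch : Char) : Bool :=
  (decide ('a' ≤ ch) && decide (ch ≤ 'z')) || (decide ('A' ≤ ch) && decide (ch ≤ 'Z'))

def IsValidNameCharacter (ch : Char) : Bool :=
  (decide ('a' ≤ ch) && decide (ch ≤ 'z')) || (decide ('A' ≤ ch) && decide (ch ≤ 'Z')) ||
    (decide ('0' ≤ ch) && decide (ch ≤ '9')) || (ch == '_')

-- A's for-loop over the characters, state = (isFirstCharInName, previousChar); early returns become results.
def pvALoop : List Char → Bool → Char → Bool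
  | [], _, _ => true
  | ch :: rest, isFirstCharInName, previousChar =>
    if ch != '.' then
      if !isFirstCharInName then
        if ch == '_' && previousChar == '_' then false
        else if !IsValidNameCharacter ch then false
        else pvALoop rest isFirstCharInName ch
      else
        if !IsValidNameStartCharacter ch then false
        else pvALoop rest false ch
    else if previousChar == '.' then false
    else pvALoop rest true ch

def IsValidUnresolvedPackageName_py (name : String) : Bool :=
  pvALoop name.toList true ' '

-- ===== PORT B =====
-- per-segment check of Source B: empty segment only first/last; else letter, then letters/digits/_ and no "__"
def pvSegCheck (i last : Nat) (seg : List Char) : Bool :=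
  match seg with
  | [] => !(0 < i && i < last)
  | c :: cs =>
      PySem.Chars.isalpha c
        && cs.all (fun ch => PySem.Chars.isalpha ch || PySem.Chars.isdigit ch || ch == '_')
        && !(PySem.Chars.isIn ['_', '_'] (c :: cs))

def IsValidUnresolvedPackageName_py_alt (name : String) : Bool :=
  let segments := name.toList.splitOn '.'   -- name.split('.')
  let last := segments.length - 1
  (segments.zipIdx).all (fun p => pvSegCheck p.2 last p.1)

-- ===== PRECONDITION & SPEC =====
def Spec_IsValidUnresolvedPackageName_py (name : String) (out : Bool) : Prop := out = IsValidUnresolvedPackageName_py_alt name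
instance (name : String) (out : Bool) : Decidable (Spec_IsValidUnresolvedPackageName_py name out) := by unfold Spec_IsValidUnresolvedPackageName_py; infer_instance

-- ===== CLAIM (what is proved, stated in full; the proofs are below) =====
def Claim_equal_IsValidUnresolvedPackageName_py : Prop := ∀ (name : String), Dom_IsValidUnresolvedPackageName_py name → Spec_IsValidUnresolvedPackageName_py name (IsValidUnresolvedPackageName_py name)

-- ===== LEMMAS AND PROOFS =====

-- A's scan of the tail of a segment, previous char p
def pvATail : List Char → Char → Bool
  | [], _ => true
  | c :: cs, p =>
    if c == '_' && p == '_' then false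
    else if !IsValidNameCharacter c then false
    else pvATail cs c

-- a full non-empty segment as A accepts it
def pvValidSeg : List Char → Bool
  | [] => false
  | c :: cs => IsValidNameStartCharacter c && pvATail cs c

-- segments after the first (empty allowed only in last position)
def pvTailOK : List (List Char) → Bool
  | [] => true
  | [s] => s.isEmpty || pvValidSeg s
  | s :: r :: t => pvValidSeg s && pvTailOK (r :: t)

-- all segments, first may be empty too
def pvHeadOK : List (List Char) → Bool
  | [] => true
  | [s] => s.isEmpty || pvValidSeg s
  | s :: r :: t => (s.isEmpty || pvValidSeg s) && pvTailOK (r :: t)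

-- continuation of the current segment with previous char p
def pvContOK (p : Char) : List (List Char) → Bool
  | [] => true
  | [s] => pvATail s p
  | s :: r :: t => pvATail s p && pvTailOK (r :: t)

-- adjacent double underscore
def pvDD : List Char → Bool
  | a :: b :: t => (a == '_' && b == '_') || pvDD (b :: t)
  | _ => false

theorem pv_isIn_eq_dd (s : List Char) : PySem.Chars.isIn ['_', '_'] s = pvDD s := by
  induction s with
  | nil =>
    simp [pvDD]
    rw [PySem.Chars.isIn_eq_false_iff]
    intro h
    have := h.length_le
    simp at this
  | cons a t ih =>
    match t, ih with
    | [], _ =>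
      simp [pvDD]
      rw [PySem.Chars.isIn_eq_false_iff]
      intro h
      have := h.length_le
      simp at this
    | b :: t', ih =>
      show _ = ((a == '_' && b == '_') || pvDD (b :: t'))
      rw [← ih]
      by_cases hinf : ['_', '_'] <:+: (a :: b :: t')
      · rw [List.infix_cons_iff] at hinf
        rcases hinf with hp | hi
        · rw [List.cons_prefix_cons] at hp
          obtain ⟨ha, hp⟩ := hp
          rw [List.cons_prefix_cons] at hp
          obtain ⟨hb, _⟩ := hp
          subst ha hb
          have : PySem.Chars.isIn ['_','_'] ('_' :: '_' :: t') = true := by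
            rw [PySem.Chars.isIn_iff_infix]; exact List.infix_cons_iff.mpr (Or.inl (by simp))
          simp [this]
        · have h1 : PySem.Chars.isIn ['_','_'] (a :: b :: t') = true := by
            rw [PySem.Chars.isIn_iff_infix]; exact List.infix_cons_iff.mpr (Or.inr hi)
          have h2 : PySem.Chars.isIn ['_','_'] (b :: t') = true := by
            rw [PySem.Chars.isIn_iff_infix]; exact hi
          simp [h1, h2]
      · have h1 : PySem.Chars.isIn ['_','_'] (a :: b :: t') = false := by
          rw [PySem.Chars.isIn_eq_false_iff]; exact hinf
        have h2 : PySem.Chars.isIn ['_','_'] (b :: t') = false := by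
          rw [PySem.Chars.isIn_eq_false_iff]
          intro h; exact hinf (List.infix_cons_iff.mpr (Or.inr h))
        have h3 : ¬ (a == '_' && b == '_') = true := by
          intro h
          simp only [Bool.and_eq_true, beq_iff_eq] at h
          exact hinf (List.infix_cons_iff.mpr (Or.inl (by simp [h.1, h.2, List.cons_prefix_cons])))
        simp [h1, h2]
        simpa using h3

theorem pv_start_eq (c : Char) : PySem.Chars.isalpha c = IsValidNameStartCharacter c := by
  simp [PySem.Chars.isalpha, PySem.Chars.isupper, PySem.Chars.islower,
    IsValidNameStartCharacter, Bool.or_comm]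

theorem pv_char_eq (c : Char) :
    (PySem.Chars.isalpha c || PySem.Chars.isdigit c || c == '_') = IsValidNameCharacter c := by
  simp [PySem.Chars.isalpha, PySem.Chars.isupper, PySem.Chars.islower, PySem.Chars.isdigit,
    IsValidNameCharacter, Bool.or_comm]

theorem pv_aTail_eq (cs : List Char) (c : Char) :
    pvATail cs c = ((cs.all fun ch => IsValidNameCharacter ch) && !pvDD (c :: cs)) := by
  induction cs generalizing c with
  | nil => simp [pvATail, pvDD]
  | cons b t ih =>
    show pvATail (b :: t) c = _
    rw [pvATail]
    by_cases hdd : (b == '_' && c == '_') = true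
    · simp only [Bool.and_eq_true, beq_iff_eq] at hdd
      have h1 : pvDD (c :: b :: t) = true := by
        rw [pvDD]; simp [hdd.1, hdd.2]
      rw [hdd.1, hdd.2] at h1 ⊢
      simp [h1]
    · have hcond : (b == '_' && c == '_') = false := by
        exact Bool.eq_false_iff.mpr hdd
      rw [hcond]
      simp only [Bool.false_eq_true, if_false]
      have hswap : pvDD (c :: b :: t) = pvDD (b :: t) := by
        rw [pvDD]
        have : (c == '_' && b == '_') = false := by
          rw [Bool.and_comm]; exact hcond
        simp [this]
      by_cases hv : IsValidNameCharacter b = true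
      · rw [hv]
        simp only [Bool.not_true, Bool.false_eq_true, if_false]
        rw [ih b, hswap, List.all_cons, hv]
        simp
      · have hv' : IsValidNameCharacter b = false := by
          exact Bool.eq_false_iff.mpr hv
        simp [hv']

theorem pv_validSeg_eq (i last : Nat) (c : Char) (cs : List Char) :
    pvSegCheck i last (c :: cs) = pvValidSeg (c :: cs) := by
  show _ = (IsValidNameStartCharacter c && pvATail cs c)
  rw [pvSegCheck, pv_aTail_eq, pv_isIn_eq_dd, pv_start_eq]
  have : (cs.all fun ch => PySem.Chars.isalpha ch || PySem.Chars.isdigit ch || ch == '_')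
       = (cs.all fun ch => IsValidNameCharacter ch) := by
    induction cs with
    | nil => rfl
    | cons x xs ihx => simp only [List.all_cons, pv_char_eq]
  rw [this, Bool.and_assoc]

theorem pv_splitOn_cons (c : Char) (l : List Char) :
    (c :: l).splitOn '.' =
      if c = '.' then [] :: l.splitOn '.'
      else List.modifyHead (List.cons c) (l.splitOn '.') := by
  show List.splitOnP _ _ = _
  rw [List.splitOnP_cons]
  by_cases h : c = '.' <;> simp [h, List.splitOn]

theorem pv_aLoop_split (l : List Char) :
    pvALoop l true ' ' = pvHeadOK (l.splitOn '.') ∧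
    pvALoop l true '.' = pvTailOK (l.splitOn '.') ∧
    ∀ p, p ≠ '.' → pvALoop l false p = pvContOK p (l.splitOn '.') := by
  induction l with
  | nil =>
    refine ⟨?_, ?_, ?_⟩ <;> simp [pvALoop, List.splitOn, pvHeadOK, pvTailOK, pvContOK, pvATail]
  | cons c rest ih =>
    obtain ⟨ih1, ih2, ih3⟩ := ih
    obtain ⟨s, ss, hss⟩ : ∃ s ss, rest.splitOn '.' = s :: ss := by
      cases h : rest.splitOn '.' with
      | nil => exact absurd h (List.splitOnP_ne_nil _ _)
      | cons a b => exact ⟨a, b, rfl⟩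
    by_cases hc : c = '.'
    · subst hc
      rw [pv_splitOn_cons]
      simp only [hss]
      refine ⟨?_, ?_, ?_⟩
      · -- initial state: ' ' ≠ '.', new empty segment start
        rw [pvALoop]
        norm_num
        rw [ih2, hss]
        cases ss with
        | nil => simp [pvHeadOK, pvTailOK, List.isEmpty]
        | cons r t => simp [pvHeadOK, pvTailOK, List.isEmpty]
      · rw [pvALoop]; norm_num [pvTailOK, pvValidSeg]
      · intro p hp
        rw [pvALoop]
        have : (p == '.') = false := by simpa using hp
        norm_num [this]
        rw [ih2, hss]
        simp [pvContOK, pvATail]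
    · rw [pv_splitOn_cons]
      simp only [if_neg hc, hss, List.modifyHead]
      have hrec : pvALoop rest false c = pvContOK c (s :: ss) := by rw [ih3 c hc, hss]
      have hbne : (c != '.') = true := by simpa using hc
      refine ⟨?_, ?_, ?_⟩
      · rw [pvALoop]
        cases hst : IsValidNameStartCharacter c with
        | false => cases ss <;> simp [hbne, hst, pvHeadOK, pvValidSeg]
        | true => cases ss <;>
            simp_all [pvContOK, pvHeadOK, pvTailOK, pvValidSeg]
      · rw [pvALoop]
        cases hst : IsValidNameStartCharacter c with
        | false => cases ss <;> simp [hbne, hst, pvTailOK, pvValidSeg]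
        | true => cases ss <;>
            simp_all [pvContOK, pvTailOK, pvValidSeg]
      · intro p hp
        rw [pvALoop]
        cases hdd : (c == '_' && p == '_') with
        | true => cases ss <;> simp [hbne, hdd, pvContOK, pvATail]
        | false =>
          cases hv : IsValidNameCharacter c with
          | false => cases ss <;> simp [hbne, hdd, hv, pvContOK, pvATail]
          | true =>
            cases ss <;>
              · simp_all [pvContOK, pvTailOK, pvATail, Bool.and_assoc]
                tauto

theorem pv_zip_tail (rest : List (List Char)) (k last : Nat)
    (hk : 1 ≤ k) (hlen : k + rest.length = last + 1) :
    ((rest.zipIdx k).all fun p => pvSegCheck p.2 last p.1) = pvTailOK rest := by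
  induction rest generalizing k with
  | nil => simp [pvTailOK]
  | cons s rest' ih =>
    rw [List.zipIdx_cons, List.all_cons]
    cases rest' with
    | nil =>
      have hkl : k = last := by simp at hlen; omega
      subst hkl
      have hchk : pvSegCheck k k s = (s.isEmpty || pvValidSeg s) := by
        cases s with
        | nil => simp [pvSegCheck, List.isEmpty]
        | cons c cs => simp [pv_validSeg_eq, List.isEmpty]
      simp [pvTailOK, hchk]
    | cons r t =>
      have hlt : k < last := by simp at hlen; omega
      have hchk : pvSegCheck k last s = pvValidSeg s := by
        cases s with
        | nil => simp [pvSegCheck, pvValidSeg]; omega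
        | cons c cs => exact pv_validSeg_eq _ _ _ _
      rw [hchk, ih (k+1) (by omega) (by simp at hlen ⊢; omega)]
      simp [pvTailOK]

theorem pv_alt_eq_headOK (name : String) :
    IsValidUnresolvedPackageName_py_alt name = pvHeadOK (name.toList.splitOn '.') := by
  show ((name.toList.splitOn '.').zipIdx).all _ = _
  obtain ⟨s, ss, hss⟩ : ∃ s ss, name.toList.splitOn '.' = s :: ss := by
    cases h : name.toList.splitOn '.' with
    | nil => exact absurd h (List.splitOnP_ne_nil _ _)
    | cons a b => exact ⟨a, b, rfl⟩
  rw [hss]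
  rw [List.zipIdx_cons, List.all_cons]
  have hchk0 : ∀ last, pvSegCheck 0 last s = (s.isEmpty || pvValidSeg s) := by
    intro last
    cases s with
    | nil => simp [pvSegCheck, List.isEmpty]
    | cons c cs => simp [pv_validSeg_eq, List.isEmpty]
  cases ss with
  | nil => simp [hchk0, pvHeadOK]
  | cons r t =>
    rw [hchk0]
    rw [pv_zip_tail (r :: t) 1 ((s :: r :: t).length - 1) (by omega) (by simp; omega)]
    simp [pvHeadOK]

-- ===== VERDICT (by name: the statement is the Claim_ definition above) =====
theorem IsValidUnresolvedPackageName_py_spec : Claim_equal_IsValidUnresolvedPackageName_py := by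
  intro name _
  unfold Spec_IsValidUnresolvedPackageName_py
  rw [pv_alt_eq_headOK]
  exact (pv_aLoop_split name.toList).1
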